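-- pv_equiv track=rewrite | github.com/PaulaAlessio/work_in_progress | phylogen/combinatorics.py | get_all_pairs
-- ===== SOURCE A (Python) =====
-- import copy, itertools
--
-- def get_all_pairs(lst):
--     """ Get pairs of elements in the
--         list in all possible ways.
--         INPUT: list of N elements
--         OUTPUT: list of list of lists containing the pairs
--         Example: lst [0,1,2,3]
--             res  = [ [[0,1], [2,3]],
--                      [[0,2], [1,3]],
--                      [[0,3], [1,2]]
--     """
--     result =[]
--     L = len(lst)
--     if (L%2) :
--       raise NameError("Number of elements is odd. Aborting.")
--     if  L  < 2:
--         return [lst]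
--     a = lst[0]
--     for i in range(1,L):
--         pair = [a,lst[i]]
--         rest = get_all_pairs(lst[1:i]+lst[i+1:])
--         for res in rest:
--             result.append(copy.deepcopy([pair] + res))
--     return result
-- ===== SOURCE B (Python) =====
-- def get_all_pairs(lst):
--     """ Get pairs of elements in the
--         list in all possible ways (iterative DFS with an explicit stack). """
--     if len(lst) % 2:
--         raise NameError("Number of elements is odd. Aborting.")
--     result = []
--     stack = [([], lst)]
--     while stack:
--         matching, rem = stack.pop()
--         if not rem:
--             result.append(matching)
--             continue
--         a = rem[0]
--         # push partners in reverse index order so the LIFO stack visits them in order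
--         for i in range(len(rem) - 1, 0, -1):
--             stack.append((matching + [[a, rem[i]]], rem[1:i] + rem[i + 1:]))
--     return result
-- ===== Notes on version B (the rewrite author's own statement) =====
-- stated objective: alternative
-- what changed: Replaces A's recursion (with deepcopy on every emitted matching) by an iterative DFS over an explicit stack of (matching, remaining) partial states, pushing partner choices in reverse so the LIFO pop order reproduces A's exact output order.
import Mathlib
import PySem

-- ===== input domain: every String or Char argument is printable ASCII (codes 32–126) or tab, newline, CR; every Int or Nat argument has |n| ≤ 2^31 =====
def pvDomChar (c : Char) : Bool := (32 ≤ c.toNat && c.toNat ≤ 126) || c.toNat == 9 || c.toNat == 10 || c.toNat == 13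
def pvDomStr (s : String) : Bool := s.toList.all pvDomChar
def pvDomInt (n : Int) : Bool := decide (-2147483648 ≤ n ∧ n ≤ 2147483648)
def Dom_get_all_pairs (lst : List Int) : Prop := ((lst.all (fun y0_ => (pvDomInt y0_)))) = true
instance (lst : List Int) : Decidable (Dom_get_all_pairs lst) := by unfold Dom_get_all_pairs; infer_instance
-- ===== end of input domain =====

-- B replaces A's recursion by an explicit iterative worklist of (matching, remaining) states
-- (same output value and order); objective: alternative decomposition, not speed.

-- ===== PORT A =====
-- A's recursive call argument lst[1:i]+lst[i+1:] has length lst.length - 2 for i in range(1, len)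
theorem pv_rest_len (lst : List Int) (i : Int) (h1 : 1 ≤ i) (h2 : i < (lst.length : Int)) :
    (PySem.List.slice lst (some 1) (some i) ++ PySem.List.slice lst (some (i+1)) none).length
      = lst.length - 2 := by
  rw [PySem.List.slice_toNat lst (by omega) (by omega), PySem.List.slice_from lst (by omega)]
  simp only [List.length_append, List.length_take, List.length_drop]
  omega

-- port of A: recursion exactly as in the Python (NameError branch returns [] — outside Pre_;
-- the L < 2 branch is reached only for lst = [], where Python's [lst] is [[]];
-- '.attach' on the range is termination plumbing only — List.foldl_attach removes it)
def get_all_pairs (lst : List Int) : List (List (List Int)) :=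
  if lst.length % 2 = 1 then []  -- raise NameError
  else if lst.length < 2 then [[]]
  else
    let a := PySem.List.pyGetD lst 0 0
    (PySem.List.pyRange 1 lst.length 1).attach.foldl
      (fun result i =>
        (get_all_pairs
          (PySem.List.slice lst (some 1) (some i.1) ++
            PySem.List.slice lst (some (i.1+1)) none)).foldl
          (fun r res => r ++ [[a, PySem.List.pyGetD lst i.1 0] :: res]) result)
      []
termination_by lst.length
decreasing_by
  have hi' := (PySem.List.mem_pyRange_one).1 i.2
  rw [pv_rest_len lst i.1 hi'.1 hi'.2]
  omega

-- ===== PORT B =====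
-- size of the DFS tree rooted at a state with n remaining elements (termination measure only)
def pvNodes : Nat → Nat
  | 0 => 1
  | 1 => 1
  | (n+2) => 1 + (n+1) * pvNodes n

def pvMeasure (st : List (List (List Int) × List Int)) : Nat :=
  (st.map (fun p => pvNodes p.2.length)).sum

theorem pv_pushes_measure (matching : List (List Int)) (a : Int) (rest : List Int) :
    (((PySem.List.pyRange 1 (a :: rest).length 1).map
        (fun i => (matching ++ [[a, PySem.List.pyGetD (a :: rest) i 0]],
                   PySem.List.slice (a :: rest) (some 1) (some i) ++
                     PySem.List.slice (a :: rest) (some (i+1)) none))).map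
        (fun p => pvNodes p.2.length)).sum < pvNodes (a :: rest).length := by
  set rem := a :: rest with hrem
  have hconst : ((PySem.List.pyRange 1 rem.length 1).map
      (fun i => (matching ++ [[a, PySem.List.pyGetD rem i 0]],
                 PySem.List.slice rem (some 1) (some i) ++
                   PySem.List.slice rem (some (i+1)) none))).map (fun p => pvNodes p.2.length)
      = (PySem.List.pyRange 1 rem.length 1).map (fun _ => pvNodes (rem.length - 2)) := by
    rw [List.map_map]
    refine List.map_congr_left ?_
    intro i hi
    have hi' := (PySem.List.mem_pyRange_one).1 hi
    simp only [Function.comp]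
    rw [pv_rest_len rem i hi'.1 hi'.2]
  rw [hconst, List.map_const', List.sum_replicate, smul_eq_mul,
    PySem.List.length_pyRange_one]
  rcases rest with _ | ⟨b, t⟩
  · rw [hrem]
    simp [pvNodes]
  · have hn : rem.length = t.length + 2 := by rw [hrem]; simp
    rw [hn, pvNodes]
    have h2 : (((t.length + 2 : Nat) : Int) - 1).toNat = t.length + 1 := by omega
    have h3 : t.length + 2 - 2 = t.length := by omega
    rw [h2, h3]
    omega

-- the while-loop of B; the stack's head is its top, so Python's reversed-order pushes
-- become prepending the increasing-index list of new states
def runStack : List (List (List Int) × List Int) → List (List (List Int)) → List (List (List Int))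
  | [], result => result
  | (matching, []) :: stack, result => runStack stack (result ++ [matching])
  | (matching, a :: rest) :: stack, result =>
    let pushes := (PySem.List.pyRange 1 (a :: rest).length 1).map
      (fun i => (matching ++ [[a, PySem.List.pyGetD (a :: rest) i 0]],
                 PySem.List.slice (a :: rest) (some 1) (some i) ++
                   PySem.List.slice (a :: rest) (some (i+1)) none))
    runStack (pushes ++ stack) result
termination_by st _ => pvMeasure st
decreasing_by
  · simp [pvMeasure, pvNodes]
  · simp only [pvMeasure, List.map_append, List.sum_append, List.map_cons, List.sum_cons]
    have := pv_pushes_measure matching a rest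
    omega

def get_all_pairs_alt (lst : List Int) : List (List (List Int)) :=
  if lst.length % 2 = 1 then []  -- raise NameError  (outside Pre_)
  else runStack [([], lst)] []

-- ===== PRECONDITION & SPEC =====
-- Pre_ excludes odd-length lists, on which the Python A raises NameError.
def Pre_get_all_pairs (lst : List Int) : Prop := lst.length % 2 = 0
instance (lst : List Int) : Decidable (Pre_get_all_pairs lst) := by unfold Pre_get_all_pairs; infer_instance
def pvWitness_get_all_pairs : List Int := [0, 1, 2, 3]

def Spec_get_all_pairs (lst : List Int) (out : List (List (List Int))) : Prop := out = get_all_pairs_alt lst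
instance (lst : List Int) (out : List (List (List Int))) : Decidable (Spec_get_all_pairs lst out) := by unfold Spec_get_all_pairs; infer_instance

-- ===== CLAIM (what is proved, stated in full; the proofs are below) =====
def Claim_equal_get_all_pairs : Prop := ∀ (lst : List Int), Dom_get_all_pairs lst → Pre_get_all_pairs lst → Spec_get_all_pairs lst (get_all_pairs lst)

-- ===== LEMMAS AND PROOFS =====

-- A on an odd-length list returns the NameError sentinel []
theorem get_all_pairs_odd (lst : List Int) (h : lst.length % 2 = 1) :
    get_all_pairs lst = [] := by
  rw [get_all_pairs, if_pos h]

-- A's loop, written as a flatMap (for lists of length ≥ 2, even or odd)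
theorem get_all_pairs_unfold (a : Int) (rest : List Int) (hlen : 2 ≤ (a :: rest).length)
    (hev : ¬ (a :: rest).length % 2 = 1) :
    get_all_pairs (a :: rest)
      = (PySem.List.pyRange 1 (a :: rest).length 1).flatMap
          (fun i => (get_all_pairs (PySem.List.slice (a :: rest) (some 1) (some i) ++
              PySem.List.slice (a :: rest) (some (i+1)) none)).map
            (fun res => [a, PySem.List.pyGetD (a :: rest) i 0] :: res)) := by
  rw [get_all_pairs, if_neg hev, if_neg (by omega)]
  simp only [PySem.List.pyGetD_zero_cons,
    PySem.List.foldl_append_singleton_eq_map, PySem.List.foldl_append_eq_flatMap,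
    List.nil_append]
  conv_rhs => rw [← List.attach_map_subtype_val (PySem.List.pyRange 1 ((a :: rest).length : Int) 1)]
  rw [List.flatMap_map]

-- runStack emits exactly the recursive results of each stacked state, prefixed by its matching
theorem runStack_eq (st : List (List (List Int) × List Int)) (result : List (List (List Int))) :
    runStack st result
      = result ++ st.flatMap (fun p => (get_all_pairs p.2).map (p.1 ++ ·)) := by
  fun_induction runStack st result with
  | case1 result => simp
  | case2 matching stack result ih =>
    rw [ih]
    have h0 : get_all_pairs [] = [[]] := by rw [get_all_pairs]; simp
    simp [h0]
  | case3 matching a rest stack result pushes ih =>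
    rw [ih, List.flatMap_append, List.flatMap_cons]
    have hF : pushes.flatMap (fun p => (get_all_pairs p.2).map (p.1 ++ ·))
        = (PySem.List.pyRange 1 (a :: rest).length 1).flatMap
            (fun i => (get_all_pairs (PySem.List.slice (a :: rest) (some 1) (some i) ++
                PySem.List.slice (a :: rest) (some (i+1)) none)).map
              (fun res => (matching ++ [[a, PySem.List.pyGetD (a :: rest) i 0]]) ++ res)) := by
      show ((PySem.List.pyRange 1 (a :: rest).length 1).map _).flatMap _ = _
      rw [List.flatMap_map]
    have hpush : pushes.flatMap (fun p => (get_all_pairs p.2).map (p.1 ++ ·))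
        = (get_all_pairs (a :: rest)).map (matching ++ ·) := by
      by_cases hodd : (a :: rest).length % 2 = 1
      · rw [get_all_pairs_odd _ hodd, hF]
        rw [List.flatMap_eq_nil_iff.2]
        · simp
        · intro i hi
          have hi' := (PySem.List.mem_pyRange_one).1 hi
          have hlen := pv_rest_len (a :: rest) i hi'.1 hi'.2
          rw [get_all_pairs_odd _ (by
            rw [hlen]; simp only [List.length_cons] at hodd hi' ⊢; omega)]
          simp
      · rcases rest with _ | ⟨b, t⟩
        · exact absurd (by simp) hodd
        · rw [get_all_pairs_unfold a (b :: t) (by simp) hodd, hF, List.map_flatMap]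
          congr 1
          funext i
          simp [List.map_map, Function.comp_def]
    rw [hpush]

-- ===== VERDICT (by name: the statement is the Claim_ definition above) =====
theorem get_all_pairs_spec : Claim_equal_get_all_pairs := by
  intro lst _ hpre
  unfold Spec_get_all_pairs get_all_pairs_alt
  have h1 : ¬ lst.length % 2 = 1 := by unfold Pre_get_all_pairs at hpre; omega
  rw [if_neg h1, runStack_eq]
  simp
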